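-- pv_equiv track=rewrite | github.com/adelegi/Challenge_ENS | features_adele.py | generate_a_day
-- ===== SOURCE A (Python) =====
-- def generate_a_day(hours, values, seuil_sup=10^6, seuil_inf=0):
--     """ hours must be integers! """
--     output_values = []
--     output_in = []
--     h_prec = hours[0]
--
--     for i in range(1, len(hours)):
--         h_next = hours[i]
--         output_values += [values[i-1] for _ in range(h_prec, h_next)]
--
--         if values[i-1] < seuil_sup and values[i-1] > seuil_inf:
--             output_in += [1 for _ in range(h_prec, h_next)]
--         else:
--             output_in += [0 for _ in range(h_prec, h_next)]
--
--         h_prec = h_next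
--
--     return output_values, output_in
-- ===== SOURCE B (Python) =====
-- def generate_a_day(hours, values, seuil_sup=10^6, seuil_inf=0):
--     """ hours must be integers! """
--     h_prec = hours[0]
--     output_values = []
--     for h_next, v in zip(hours[1:], values):
--         output_values += [v] * (h_next - h_prec)
--         h_prec = h_next
--     output_in = [1 if seuil_inf < v < seuil_sup else 0 for v in output_values]
--     return output_values, output_in
-- ===== Notes on version B (the rewrite author's own statement) =====
-- stated objective: simpler
-- what changed: A's single interleaved loop carrying three pieces of state is split into one loop over zipped consecutive-hour/value pairs that only materializes the expanded values (via list repetition instead of per-interval comprehensions), followed by a separate comprehension deriving the in-range flags directly from the expanded output.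
import Mathlib
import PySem

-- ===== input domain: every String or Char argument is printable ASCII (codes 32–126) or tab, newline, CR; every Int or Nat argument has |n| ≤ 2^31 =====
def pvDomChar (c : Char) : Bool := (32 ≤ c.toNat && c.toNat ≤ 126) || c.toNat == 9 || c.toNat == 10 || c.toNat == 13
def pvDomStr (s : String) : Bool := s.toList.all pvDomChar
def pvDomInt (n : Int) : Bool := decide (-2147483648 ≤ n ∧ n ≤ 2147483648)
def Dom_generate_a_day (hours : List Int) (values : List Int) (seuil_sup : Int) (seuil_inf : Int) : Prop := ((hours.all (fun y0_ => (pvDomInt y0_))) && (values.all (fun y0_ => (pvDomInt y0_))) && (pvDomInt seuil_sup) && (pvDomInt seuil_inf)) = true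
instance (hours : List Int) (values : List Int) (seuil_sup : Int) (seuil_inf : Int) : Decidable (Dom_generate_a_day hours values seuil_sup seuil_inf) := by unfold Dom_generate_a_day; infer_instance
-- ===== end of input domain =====

-- B splits A's interleaved three-state loop into a values-only expansion pass plus a
-- separate flag comprehension over the expanded values; objective: simpler decomposition.

-- ===== PORT A =====
def generate_a_day (hours : List Int) (values : List Int) (seuil_sup : Int) (seuil_inf : Int) : List Int × List Int :=
  -- output_values = []; output_in = []; h_prec = hours[0]  (empty hours raises: excluded by Pre_)
  let h0 := PySem.List.pyGetD hours 0 0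
  let st := (PySem.List.pyRange 1 (hours.length : Int) 1).foldl
    (fun (s : List Int × List Int × Int) i =>
      let h_next := PySem.List.pyGetD hours i 0
      let v := PySem.List.pyGetD values (i - 1) 0
      let ov := s.1 ++ (PySem.List.pyRange s.2.2 h_next 1).map (fun _ => v)
      let oi := if v < seuil_sup ∧ v > seuil_inf
        then s.2.1 ++ (PySem.List.pyRange s.2.2 h_next 1).map (fun _ => (1 : Int))
        else s.2.1 ++ (PySem.List.pyRange s.2.2 h_next 1).map (fun _ => (0 : Int))
      (ov, oi, h_next)) ([], [], h0)
  (st.1, st.2.1)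

-- ===== PORT B =====
def generate_a_day_alt (hours : List Int) (values : List Int) (seuil_sup : Int) (seuil_inf : Int) : List Int × List Int :=
  -- h_prec = hours[0]  (empty hours raises: excluded by Pre_)
  let h0 := PySem.List.pyGetD hours 0 0
  let st := ((hours.drop 1).zip values).foldl
    (fun (s : List Int × Int) p => (s.1 ++ List.replicate (p.1 - s.2).toNat p.2, p.1)) ([], h0)
  (st.1, st.1.map (fun v => if seuil_inf < v ∧ v < seuil_sup then (1 : Int) else 0))

-- ===== PRECONDITION & SPEC =====
-- A raises IndexError on empty hours (hours[0]) and whenever values has fewer than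
-- len(hours)-1 elements (values[i-1]); exactly those inputs are excluded.
def Pre_generate_a_day (hours : List Int) (values : List Int) (seuil_sup : Int) (seuil_inf : Int) : Prop :=
  hours ≠ [] ∧ hours.length ≤ values.length + 1
instance (hours : List Int) (values : List Int) (seuil_sup : Int) (seuil_inf : Int) : Decidable (Pre_generate_a_day hours values seuil_sup seuil_inf) := by unfold Pre_generate_a_day; infer_instance
def pvWitness_generate_a_day : List Int × List Int × Int × Int := ([0, 2, 5], [3, 20], 12, 0)

def Spec_generate_a_day (hours : List Int) (values : List Int) (seuil_sup : Int) (seuil_inf : Int) (out : List Int × List Int) : Prop := out = generate_a_day_alt hours values seuil_sup seuil_inf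
instance (hours : List Int) (values : List Int) (seuil_sup : Int) (seuil_inf : Int) (out : List Int × List Int) : Decidable (Spec_generate_a_day hours values seuil_sup seuil_inf out) := by unfold Spec_generate_a_day; infer_instance

-- ===== CLAIM (what is proved, stated in full; the proofs are below) =====
def Claim_equal_generate_a_day : Prop := ∀ (hours : List Int) (values : List Int) (seuil_sup : Int) (seuil_inf : Int), Dom_generate_a_day hours values seuil_sup seuil_inf → Pre_generate_a_day hours values seuil_sup seuil_inf → Spec_generate_a_day hours values seuil_sup seuil_inf (generate_a_day hours values seuil_sup seuil_inf)

-- ===== LEMMAS AND PROOFS =====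

-- A's index-driven fold over range(1, len(xs)) with lookups xs[i], ys[i-1]
-- equals a fold over the zip of the corresponding suffixes.
lemma pv_idx_zip {σ : Type} (F : σ → Int → Int → σ) (xs ys : List Int) :
    ∀ (a : List Int) (k : Nat) (init : σ),
      xs.drop (k + 1) = a → a.length ≤ (ys.drop k).length →
      (PySem.List.pyRange ((k : Int) + 1) (xs.length : Int) 1).foldl
          (fun s i => F s (PySem.List.pyGetD xs i 0) (PySem.List.pyGetD ys (i - 1) 0)) init
        = (a.zip (ys.drop k)).foldl (fun s p => F s p.1 p.2) init := by
  intro a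
  induction a with
  | nil =>
    intro k init hdrop _
    have hlen : xs.length ≤ k + 1 := by
      by_contra h
      have := List.drop_eq_nil_iff.mp hdrop
      omega
    rw [PySem.List.pyRange_one_eq_nil (by exact_mod_cast hlen)]
    simp
  | cons x a' ih =>
    intro k init hdrop hle
    have hk : k + 1 < xs.length := by
      have := congrArg List.length hdrop
      simp at this
      omega
    obtain ⟨y, b', hb⟩ : ∃ y b', ys.drop k = y :: b' := by
      cases hys : ys.drop k with
      | nil => rw [hys] at hle; simp at hle
      | cons y b' => exact ⟨y, b', rfl⟩
    have hdrop' : xs.drop (k + 1 + 1) = a' := by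
      have h0 : xs.drop (k + 1 + 1) = (xs.drop (k + 1)).drop 1 := by
        rw [List.drop_drop]
      rw [h0, hdrop]; rfl
    have hydrop' : ys.drop (k + 1) = b' := by
      have h0 : ys.drop (k + 1) = (ys.drop k).drop 1 := by
        rw [List.drop_drop]
      rw [h0, hb]; rfl
    have hxk : PySem.List.pyGetD xs ((k : Int) + 1) 0 = x := by
      have h1 : ((k : Int) + 1) = ((k + 1 : Nat) : Int) := by push_cast; ring
      rw [h1, PySem.List.pyGetD_natCast]
      have : xs[k + 1]? = some x := by
        have h0 : (xs.drop (k + 1))[0]? = xs[k + 1 + 0]? := List.getElem?_drop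
        rw [hdrop] at h0
        simpa using h0.symm
      simp [List.getD, this]
    have hyk : PySem.List.pyGetD ys (((k : Int) + 1) - 1) 0 = y := by
      have h1 : (((k : Int) + 1) - 1) = ((k : Nat) : Int) := by push_cast; ring
      rw [h1, PySem.List.pyGetD_natCast]
      have : ys[k]? = some y := by
        have h0 : (ys.drop k)[0]? = ys[k + 0]? := List.getElem?_drop
        rw [hb] at h0
        simpa using h0.symm
      simp [List.getD, this]
    rw [PySem.List.pyRange_one_cons (by exact_mod_cast hk)]
    simp only [List.foldl_cons, hb, List.zip_cons_cons, hxk, hyk]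
    have hle' : a'.length ≤ (ys.drop (k + 1)).length := by
      rw [hydrop']
      have h1 := congrArg List.length hb
      simp [List.length_drop] at h1
      simp [List.length_drop] at hle
      omega
    have hrec := ih (k + 1) (F init x y) hdrop' hle'
    have hcast : ((k + 1 : Nat) : Int) + 1 = (k : Int) + 1 + 1 := by push_cast; ring
    rw [hydrop', hcast] at hrec
    exact hrec

-- The interleaved A-loop, started with the flag invariant, stays in lock-step with
-- B's values-only loop, the flag list being the flag-map of the value list.
lemma pv_loop_eq (ss si : Int) (l : List (Int × Int)) :
    ∀ (ov : List Int) (h : Int),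
      l.foldl
        (fun (s : List Int × List Int × Int) p =>
          (s.1 ++ (PySem.List.pyRange s.2.2 p.1 1).map (fun _ => p.2),
           if p.2 < ss ∧ p.2 > si
             then s.2.1 ++ (PySem.List.pyRange s.2.2 p.1 1).map (fun _ => (1 : Int))
             else s.2.1 ++ (PySem.List.pyRange s.2.2 p.1 1).map (fun _ => (0 : Int)),
           p.1))
        (ov, ov.map (fun v => if si < v ∧ v < ss then (1 : Int) else 0), h)
      = (let st := l.foldl
           (fun (s : List Int × Int) p => (s.1 ++ List.replicate (p.1 - s.2).toNat p.2, p.1)) (ov, h);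
         (st.1, st.1.map (fun v => if si < v ∧ v < ss then (1 : Int) else 0), st.2)) := by
  induction l with
  | nil => intro ov h; rfl
  | cons p l ih =>
    intro ov h
    simp only [List.foldl_cons]
    have hrep : (PySem.List.pyRange h p.1 1).map (fun _ => p.2)
        = List.replicate (p.1 - h).toNat p.2 := by
      rw [List.map_const']
      rw [PySem.List.length_pyRange_one]
    have hflag : (if p.2 < ss ∧ p.2 > si
          then (ov.map (fun v => if si < v ∧ v < ss then (1 : Int) else 0)) ++ (PySem.List.pyRange h p.1 1).map (fun _ => (1 : Int))
          else (ov.map (fun v => if si < v ∧ v < ss then (1 : Int) else 0)) ++ (PySem.List.pyRange h p.1 1).map (fun _ => (0 : Int)))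
        = (ov ++ List.replicate (p.1 - h).toNat p.2).map (fun v => if si < v ∧ v < ss then (1 : Int) else 0) := by
      rw [List.map_append, List.map_replicate]
      by_cases hc : p.2 < ss ∧ p.2 > si
      · rw [if_pos hc, if_pos ⟨hc.2, hc.1⟩]
        congr 1
        rw [List.map_const', PySem.List.length_pyRange_one]
      · rw [if_neg hc, if_neg (fun h' => hc ⟨h'.2, h'.1⟩)]
        congr 1
        rw [List.map_const', PySem.List.length_pyRange_one]
    rw [hrep, hflag]
    exact ih (ov ++ List.replicate (p.1 - h).toNat p.2) p.1

-- ===== VERDICT (by name: the statement is the Claim_ definition above) =====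
theorem generate_a_day_spec : Claim_equal_generate_a_day := by
  intro hours values ss si _ hpre
  obtain ⟨hne, hlen⟩ := hpre
  unfold Spec_generate_a_day generate_a_day generate_a_day_alt
  simp only []
  have hzip := pv_idx_zip
    (fun (s : List Int × List Int × Int) h_next v =>
      (s.1 ++ (PySem.List.pyRange s.2.2 h_next 1).map (fun _ => v),
       if v < ss ∧ v > si
         then s.2.1 ++ (PySem.List.pyRange s.2.2 h_next 1).map (fun _ => (1 : Int))
         else s.2.1 ++ (PySem.List.pyRange s.2.2 h_next 1).map (fun _ => (0 : Int)),
       h_next))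
    hours values (hours.drop 1) 0 (([] : List Int), ([] : List Int), PySem.List.pyGetD hours 0 0)
    (by simp) (by simp; omega)
  simp only [Nat.cast_zero, zero_add, List.drop_zero] at hzip
  rw [hzip]
  have := pv_loop_eq ss si ((hours.drop 1).zip values) [] (PySem.List.pyGetD hours 0 0)
  simp only [List.map_nil] at this
  rw [this]
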